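-- pv_equiv track=rewrite | github.com/iwonieevo/Zadania-maturalne | Matura Próbna UMK Styczeń 2022/zad. 3/3.4.py | operations_to_sort
-- ===== SOURCE A (Python) =====
-- def flip(a, b, tab):
--     answer = []
--     a -= 1
--     b -= 1
--     if a > 0:
--         answer += tab[:a]
--     temp = tab[a:(b + 1)]
--     temp.reverse()
--     answer += temp
--     if b < len(tab) - 1:
--         answer += tab[(b + 1):]
--     return answer
--
-- def operations_to_sort(tab):
--     answer = []
--     for i in range(len(tab)):
--         minIndex = tab.index(min(tab[i:]))
--         if minIndex != i:
--             tab = flip(i + 1, minIndex + 1, tab)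
--             answer.append(f"flip({i + 1},{minIndex + 1})")
--     return answer
-- ===== SOURCE B (Python) =====
-- def operations_to_sort(tab):
--     tab = list(tab)
--     ops = []
--     for i, v in enumerate(sorted(tab)):
--         j = tab.index(v, i)
--         if j != i:
--             tab[i:j + 1] = reversed(tab[i:j + 1])
--             ops.append(f"flip({i + 1},{j + 1})")
--     return ops
-- ===== Notes on version B (the rewrite author's own statement) =====
-- stated objective: simpler
-- what changed: B sorts a copy once and then, for each position i, locates the i-th sorted value from position i on and reverses that segment in place, instead of A's per-step min() scan plus a GLOBAL tab.index() lookup and a three-branch flip helper; Pre_ excludes lists with a duplicated value, where A's global first-occurrence index() lookup can pick a position before i, an accident of the implementation (it records reversed flips like 'flip(2,1)' and duplicates a segment of the list) that a natural re-implementation does not reproduce.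
-- outside the precondition, e.g. on operations_to_sort([1, 1]): A returns ['flip(2,1)'], B returns []; on operations_to_sort([1, 2, 1]): A returns ['flip(2,1)', 'flip(3,1)'], B returns ['flip(2,3)']
import Mathlib
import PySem

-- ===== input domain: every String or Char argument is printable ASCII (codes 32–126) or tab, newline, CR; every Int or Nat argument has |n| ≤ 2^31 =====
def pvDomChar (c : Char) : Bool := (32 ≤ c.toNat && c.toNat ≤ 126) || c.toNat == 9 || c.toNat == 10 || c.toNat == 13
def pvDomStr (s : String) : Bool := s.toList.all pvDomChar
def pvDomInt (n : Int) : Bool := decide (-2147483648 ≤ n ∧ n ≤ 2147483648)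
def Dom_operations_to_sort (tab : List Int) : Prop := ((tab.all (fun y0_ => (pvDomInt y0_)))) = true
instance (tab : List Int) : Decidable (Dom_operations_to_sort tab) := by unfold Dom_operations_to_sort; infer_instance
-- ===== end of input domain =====

-- B is the plain selection-sort-by-flips: sort a copy once, then locate each target value
-- from position i on and reverse the segment in place — shorter and simpler than A's
-- per-step min()+global index()+three-branch flip helper; proved equal on duplicate-free
-- lists (Pre_ below).

-- ===== PORT A =====
-- f"flip({a},{b})"
def pvFmtFlip (a b : Int) : String :=
  String.ofList ("flip(".toList ++ PySem.Int.toChars a ++ [','] ++ PySem.Int.toChars b ++ [')'])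

-- literal port of A's `flip`
def pvFlip (a b : Int) (tab : List Int) : List Int :=
  let a := a - 1
  let b := b - 1
  let answer : List Int := if a > 0 then [] ++ PySem.List.slice tab none (some a) else []
  let temp := (PySem.List.slice tab (some a) (some (b + 1))).reverse
  let answer := answer ++ temp
  if b < (tab.length : Int) - 1 then answer ++ PySem.List.slice tab (some (b + 1)) none
  else answer

-- one iteration of A's `for i in range(len(tab))` loop; min()/index() raise on no value,
-- which never happens here (tab[i:] is nonempty and min(tab[i:]) ∈ tab), so the `none`
-- branches are unreachable
def pvStepA (st : List Int × List String) (i : Int) : List Int × List String :=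
  match PySem.List.min? (PySem.List.slice st.1 (some i) none) (fun x => x) with
  | none => st
  | some m =>
    match PySem.List.index? st.1 m with
    | none => st
    | some minIndex =>
      if (minIndex : Int) ≠ i then
        (pvFlip (i + 1) ((minIndex : Int) + 1) st.1,
         st.2 ++ [pvFmtFlip (i + 1) ((minIndex : Int) + 1)])
      else st

def operations_to_sort (tab : List Int) : List String :=
  ((PySem.List.pyRange 0 (tab.length : Int) 1).foldl pvStepA (tab, [])).2

-- ===== PORT B =====
-- one iteration of Source B's `for i, v in enumerate(sorted(tab))` loop;
-- `tab.index(v, i)` (first position ≥ i holding v; 0 ≤ i here) is ported by hand as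
-- index? on the drop — exact for 0 ≤ i ≤ len; its ValueError (`none`) is unreachable
-- because v = sorted(tab)[i] always occurs in tab[i:]
def pvStepB (st : List Int × List String) (iv : Int × Int) : List Int × List String :=
  let i := iv.1.toNat
  let v := iv.2
  match PySem.List.index? (st.1.drop i) v with
  | none => st
  | some d =>
    let j := i + d
    if j ≠ i then
      (st.1.take i ++ ((st.1.take (j + 1)).drop i).reverse ++ st.1.drop (j + 1),
       st.2 ++ [pvFmtFlip ((i : Int) + 1) ((j : Int) + 1)])
    else st

def operations_to_sort_alt (tab : List Int) : List String :=
  ((PySem.List.enumerate (PySem.List.sorted tab (fun x => x) false) 0).foldl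
      pvStepB (tab, [])).2

-- ===== PRECONDITION & SPEC =====
-- Pre_ excludes lists with a duplicated value: there A's choice of which occurrence of
-- min(tab[i:]) to flip to is a first-vs-last-match accident of its GLOBAL tab.index()
-- lookup (it can pick a position before i, recording a reversed "flip(i+1,g+1)" and
-- rebuilding the list with a duplicated segment), a value no natural re-implementation
-- produces; B locates the value from position i on.
def Pre_operations_to_sort (tab : List Int) : Prop := tab.Nodup
instance (tab : List Int) : Decidable (Pre_operations_to_sort tab) := by
  unfold Pre_operations_to_sort; infer_instance

def pvWitness_operations_to_sort : List Int := [2, 0, 1]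

def Spec_operations_to_sort (tab : List Int) (out : List String) : Prop :=
  out = operations_to_sort_alt tab
instance (tab : List Int) (out : List String) : Decidable (Spec_operations_to_sort tab out) := by
  unfold Spec_operations_to_sort; infer_instance

-- ===== CLAIM (what is proved, stated in full; the proofs are below) =====
def Claim_equal_operations_to_sort : Prop :=
  ∀ (tab : List Int), Dom_operations_to_sort tab → Pre_operations_to_sort tab →
    Spec_operations_to_sort tab (operations_to_sort tab)

-- ===== LEMMAS AND PROOFS =====

-- A's min(tab[i:]): any element ≤ the whole suffix is the value min? returns
theorem pv_min_eq (rest : List Int) (best : Int) (hmem : best ∈ rest)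
    (hmin : ∀ y ∈ rest, best ≤ y) :
    PySem.List.min? rest (fun x => x) = some best := by
  cases h : PySem.List.min? rest (fun x => x) with
  | none =>
    rw [PySem.List.min?_eq_none_iff] at h
    subst h; simp at hmem
  | some m0 =>
    have hm0 : m0 ∈ rest := PySem.List.min?_mem h
    have hle : ∀ y ∈ rest, m0 ≤ y := PySem.List.min?_isMin h
    have : best = m0 := le_antisymm (hmin m0 hm0) (hle best hmem)
    rw [this]

-- first occurrence after a prefix that does not hold the value
theorem pv_index_append (xs ys : List Int) (v : Int) (d : Nat)
    (hnot : v ∉ xs) (h : PySem.List.index? ys v = some d) :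
    PySem.List.index? (xs ++ ys) v = some (xs.length + d) := by
  rw [PySem.List.index?_eq_some_iff] at h ⊢
  obtain ⟨pre, suf, hys, hlen, hvp⟩ := h
  exact ⟨xs ++ pre, suf, by rw [hys, List.append_assoc],
    by simp [hlen], by simp [hvp, hnot]⟩

-- A's flip at 1-based (i+1, j+1) equals B's in-place slice reversal
theorem pv_flip_uniform (t : List Int) (i j : Nat) (hij : i ≤ j) (hj : j < t.length) :
    pvFlip ((i : Int) + 1) ((j : Int) + 1) t
      = t.take i ++ ((t.take (j + 1)).drop i).reverse ++ t.drop (j + 1) := by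
  have hL1 : (i : Int) + 1 - 1 = ((i : Nat) : Int) := by ring
  have hb0 : (j : Int) + 1 - 1 = (j : Int) := by ring
  have hseg : PySem.List.slice t (some (i : Int)) (some ((j : Int) + 1))
      = (t.take (j + 1)).drop i := by
    rw [show ((j : Int) + 1) = (((j + 1 : Nat)) : Int) by push_cast; ring,
      PySem.List.slice_natCast, List.drop_take]
  have c1 : (if ((i : Nat) : Int) > 0 then ([] : List Int) ++ PySem.List.slice t none (some (i : Int)) else [])
      = t.take i := by
    split_ifs with h
    · simp [PySem.List.slice_to_natCast]
    · have hz : i = 0 := by omega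
      subst hz; simp
  simp only [pvFlip, hL1, hb0, c1, hseg, List.append_assoc]
  split_ifs with h
  · rw [show ((j : Int) + 1) = (((j + 1 : Nat)) : Int) by push_cast; ring,
      PySem.List.slice_from_natCast]
  · rw [show t.drop (j + 1) = [] from List.drop_eq_nil_of_le (by omega)]; simp

-- one loop iteration: A's step at index k equals B's step at (k, sorted[k]), and the
-- selection-sort invariant (permutation + sorted prefix) is preserved
theorem pv_step_eq (tab S t : List Int) (ops : List String) (k : Nat) (s : Int)
    (hS : S.Perm tab) (hsort : S.Pairwise (· < ·)) (htab : t.Perm tab)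
    (hpre : t.take k = S.take k) (hk : k < tab.length) (hs : S[k]? = some s) :
    pvStepA (t, ops) (k : Int) = pvStepB (t, ops) ((k : Int), s) ∧
    (pvStepA (t, ops) (k : Int)).1.Perm tab ∧
    (pvStepA (t, ops) (k : Int)).1.take (k + 1) = S.take (k + 1) := by
  have hkS : k < S.length := by rw [hS.length_eq]; exact hk
  have hkt : k < t.length := by rw [htab.length_eq]; exact hk
  have hsk : S[k] = s := by
    have := List.getElem?_eq_getElem hkS
    rw [this] at hs; exact Option.some.inj hs
  have hdropS : S.drop k = s :: S.drop (k + 1) := by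
    rw [List.drop_eq_getElem_cons hkS, hsk]
  have htS : t.Perm S := htab.trans hS.symm
  have hdropperm : (t.drop k).Perm (S.drop k) := by
    have h1 : (t.take k ++ t.drop k).Perm (S.take k ++ S.drop k) := by
      rw [List.take_append_drop, List.take_append_drop]; exact htS
    rw [hpre] at h1
    exact (List.perm_append_left_iff _).mp h1
  have hpd : (S.drop k).Pairwise (· < ·) := hsort.sublist (List.drop_sublist k S)
  have hlt_rest : ∀ y ∈ S.drop (k + 1), s < y := by
    rw [hdropS] at hpd
    exact (List.pairwise_cons.mp hpd).1
  have hmem_t : s ∈ t.drop k := by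
    rw [hdropperm.mem_iff, hdropS]; exact List.mem_cons_self
  have hminb : ∀ y ∈ t.drop k, s ≤ y := by
    intro y hy
    have hy' : y ∈ S.drop k := hdropperm.mem_iff.mp hy
    rw [hdropS] at hy'
    rcases List.mem_cons.mp hy' with h | h
    · exact le_of_eq h.symm
    · exact le_of_lt (hlt_rest y h)
  have hmin : PySem.List.min? (t.drop k) (fun x => x) = some s := pv_min_eq _ _ hmem_t hminb
  have hnotpre : s ∉ t.take k := by
    rw [hpre]
    intro hmem
    obtain ⟨l, hl, hval⟩ := List.getElem_of_mem hmem
    have hlk : l < k := by rw [List.length_take] at hl; omega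
    have hlS : l < S.length := by omega
    have : S[l] < S[k] := List.pairwise_iff_getElem.mp hsort l k hlS hkS hlk
    rw [hsk] at this
    rw [List.getElem_take] at hval
    omega
  obtain ⟨d0, hd0⟩ : ∃ d0, PySem.List.index? (t.drop k) s = some d0 := by
    cases h : PySem.List.index? (t.drop k) s with
    | none => rw [PySem.List.index?_eq_none_iff] at h; exact absurd hmem_t h
    | some d0 => exact ⟨d0, rfl⟩
  have hidx : PySem.List.index? t s = some (k + d0) := by
    have := pv_index_append (t.take k) (t.drop k) s d0 hnotpre hd0
    rw [List.take_append_drop, List.length_take_of_le (le_of_lt hkt)] at this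
    exact this
  obtain ⟨hd0lt, hd0val, -⟩ := PySem.List.getElem_of_index?_eq_some hd0
  have hjt : k + d0 < t.length := by
    have := List.length_drop (l := t) (i := k); omega
  have hslice : PySem.List.slice t (some (k : Int)) none = t.drop k :=
    PySem.List.slice_from_natCast _ _
  have htk : t[k + d0]'hjt = s := by
    have h1 : (t.drop k)[d0]? = some s := by
      rw [List.getElem?_eq_getElem hd0lt, hd0val]
    rw [List.getElem?_drop, List.getElem?_eq_getElem hjt] at h1
    exact Option.some.inj h1
  by_cases hzero : d0 = 0
  · -- no flip: both steps leave the state unchanged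
    subst hzero
    have heq : pvStepA (t, ops) (k : Int) = (t, ops) := by
      simp only [pvStepA, hslice, hmin, hidx]
      simp
    have heqB : pvStepB (t, ops) ((k : Int), s) = (t, ops) := by
      simp only [pvStepB, Int.toNat_natCast, hd0]
      simp
    have htk0 : t[k]'hkt = s := by simpa using htk
    refine ⟨by rw [heq, heqB], by rw [heq]; exact htab, ?_⟩
    rw [heq]
    rw [List.take_succ_eq_append_getElem hkt, List.take_succ_eq_append_getElem hkS,
      hpre, hsk, htk0]
  · -- flip: both steps rebuild the list the same way and append the same string
    set j := k + d0 with hj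
    have hcast : ((j : Nat) : Int) = (k : Int) + (d0 : Int) := by rw [hj]; push_cast; ring
    have hflip := pv_flip_uniform t k j (by omega) hjt
    have heqA : pvStepA (t, ops) (k : Int)
        = (t.take k ++ ((t.take (j + 1)).drop k).reverse ++ t.drop (j + 1),
           ops ++ [pvFmtFlip ((k : Int) + 1) ((j : Int) + 1)]) := by
      simp only [pvStepA, hslice, hmin, hidx]
      rw [if_pos (by rw [hcast]; omega)]
      rw [hflip]
    have heqB : pvStepB (t, ops) ((k : Int), s)
        = (t.take k ++ ((t.take (j + 1)).drop k).reverse ++ t.drop (j + 1),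
           ops ++ [pvFmtFlip ((k : Int) + 1) ((j : Int) + 1)]) := by
      simp only [pvStepB, Int.toNat_natCast, hd0]
      rw [if_pos (by omega)]
    refine ⟨by rw [heqA, heqB], ?_, ?_⟩
    · -- permutation is preserved: the rebuilt list is t with a segment reversed
      rw [heqA]
      have hseg : (t.take (j + 1)).drop k = (t.drop k).take (d0 + 1) := by
        rw [List.drop_take]; congr 1; omega
      have hsplit : t = t.take k ++ ((t.drop k).take (d0 + 1) ++ t.drop (j + 1)) := by
        have h1 : (t.drop k).take (d0 + 1) ++ (t.drop k).drop (d0 + 1) = t.drop k :=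
          List.take_append_drop _ _
        have h2 : (t.drop k).drop (d0 + 1) = t.drop (j + 1) := by
          rw [List.drop_drop]; congr 1
        rw [h2] at h1
        rw [h1]
        exact (List.take_append_drop k t).symm
      have hperm : (t.take k ++ ((t.take (j + 1)).drop k).reverse ++ t.drop (j + 1)).Perm t := by
        conv_rhs => rw [hsplit]
        rw [List.append_assoc]
        refine (List.perm_append_left_iff _).mpr ?_
        exact (List.reverse_perm _).append_right _ |>.trans
          ((hseg ▸ List.Perm.refl _ : ((t.take (j+1)).drop k).Perm ((t.drop k).take (d0+1))).append_right _)
      exact hperm.trans htab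
    · -- sorted prefix grows by one: the reversed segment starts with s = sorted[k]
      rw [heqA]
      have hseg : (t.take (j + 1)).drop k = (t.drop k).take (d0 + 1) := by
        rw [List.drop_take]; congr 1; omega
      have hrev : ((t.drop k).take (d0 + 1)).reverse
          = s :: ((t.drop k).take d0).reverse := by
        rw [List.take_succ_eq_append_getElem hd0lt, hd0val, List.reverse_append]
        simp
      rw [hseg, hrev]
      have hlenP : (t.take k).length = k := List.length_take_of_le (le_of_lt hkt)
      rw [List.append_assoc, List.take_append, hlenP]
      have h1 : k + 1 - k = 1 := by omega
      rw [h1, List.take_take]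
      have h2 : min (k + 1) k = k := by omega
      rw [h2]
      rw [List.take_succ_eq_append_getElem hkS, hpre, hsk]
      simp
-- the two folds agree step by step while the invariant holds
theorem pv_fold_eq (tab S : List Int) (hS : S.Perm tab) (hsort : S.Pairwise (· < ·)) :
    ∀ (d k : Nat) (t : List Int) (ops : List String),
      k + d = tab.length → t.Perm tab → t.take k = S.take k →
      (PySem.List.pyRange (k : Int) (tab.length : Int) 1).foldl pvStepA (t, ops)
        = (PySem.List.enumerate (S.drop k) (k : Int)).foldl pvStepB (t, ops) := by
  intro d
  induction d with
  | zero =>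
    intro k t ops hk _ _
    rw [PySem.List.pyRange_one_eq_nil (by omega),
      List.drop_eq_nil_of_le (by rw [hS.length_eq]; omega)]
    rfl
  | succ d ih =>
    intro k t ops hk htab hpre
    have hklt : k < tab.length := by omega
    have hkS : k < S.length := by rw [hS.length_eq]; exact hklt
    have hs : S[k]? = some (S[k]'hkS) := List.getElem?_eq_getElem hkS
    obtain ⟨hstep, hperm', hpre'⟩ :=
      pv_step_eq tab S t ops k (S[k]'hkS) hS hsort htab hpre hklt hs
    rw [PySem.List.pyRange_one_cons (by omega), List.drop_eq_getElem_cons hkS,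
      PySem.List.enumerate_cons, List.foldl_cons, List.foldl_cons, hstep]
    rw [show ((k : Int) + 1) = (((k + 1 : Nat)) : Int) by push_cast; ring]
    rw [← hstep]
    have hrec := ih (k + 1) (pvStepA (t, ops) (k : Int)).1 (pvStepA (t, ops) (k : Int)).2
      (by omega) hperm' hpre'
    simpa using hrec

-- ===== VERDICT (by name: the statement is the Claim_ definition above) =====
theorem operations_to_sort_spec : Claim_equal_operations_to_sort := by
  intro tab _ hnd
  unfold Pre_operations_to_sort at hnd
  unfold Spec_operations_to_sort operations_to_sort operations_to_sort_alt
  have hS : (PySem.List.sorted tab (fun x => x) false).Perm tab := PySem.List.sorted_perm tab (fun x => x) false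
  have hndS : (PySem.List.sorted tab (fun x => x) false).Nodup := hS.nodup_iff.mpr hnd
  have hle : (PySem.List.sorted tab (fun x => x) false).Pairwise (· ≤ ·) :=
    PySem.List.sorted_pairwise tab (fun x => x)
  have hsort : (PySem.List.sorted tab (fun x => x) false).Pairwise (· < ·) :=
    (hle.and hndS).imp (fun h => lt_of_le_of_ne h.1 h.2)
  have hmain := pv_fold_eq tab (PySem.List.sorted tab (fun x => x) false) hS hsort
    tab.length 0 tab [] (by omega) (List.Perm.refl _) (by simp)
  simp only [List.drop_zero, Nat.cast_zero] at hmain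
  exact congrArg Prod.snd hmain
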